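-- pv_equiv track=rewrite | github.com/ksj15242/Algorithm | 프로그래머스/3/12938. 최고의 집합/최고의 집합.py | solution
-- ===== SOURCE A (Python) =====
-- def solution(n, s):
--     q = s//n
--     r = s%n
--
--     if q==0:
--         return [-1]
--
--     answer = [q]*n
--     for i in range(n-r, n):
--         answer[i] += 1
--
--     return answer
-- ===== SOURCE B (Python) =====
-- def solution(n, s):
--     if s // n == 0:
--         return [-1]
--     # per-position greedy: each element is the floor of remaining sum / remaining slots
--     out = []
--     while n > 0:
--         q = s // n
--         out.append(q)
--         s -= q
--         n -= 1
--     return out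
-- ===== Notes on version B (the rewrite author's own statement) =====
-- stated objective: alternative
-- what changed: B replaces A's closed-form quotient/remainder index arithmetic with a per-position greedy loop: each element is the floor of (remaining sum)/(remaining slots), which is appended and subtracted, provably yielding the same ascending list.
import Mathlib
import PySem

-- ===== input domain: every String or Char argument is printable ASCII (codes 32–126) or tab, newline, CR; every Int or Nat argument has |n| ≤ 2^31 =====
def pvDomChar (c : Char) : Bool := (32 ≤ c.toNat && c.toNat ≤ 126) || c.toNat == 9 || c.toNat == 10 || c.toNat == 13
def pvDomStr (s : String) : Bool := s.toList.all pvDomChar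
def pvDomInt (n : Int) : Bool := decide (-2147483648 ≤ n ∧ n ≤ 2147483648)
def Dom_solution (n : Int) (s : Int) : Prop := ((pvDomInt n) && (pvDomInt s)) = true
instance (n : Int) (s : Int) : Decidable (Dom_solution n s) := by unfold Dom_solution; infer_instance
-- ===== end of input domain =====

-- A builds [q]*n then increments the last r slots with an index loop; B instead distributes
-- the sum greedily per position (each element = remaining_sum // remaining_slots, then recurse);
-- same O(n) cost, a genuinely different construction (alternative).


-- ===== PORT A =====
-- answer[i] += 1; exact for 0 ≤ i < len(answer), which holds for every index the loop
-- visits on inputs with n ≠ 0 (Python would raise outside that range).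
def pvBump (acc : List Int) (i : Int) : List Int :=
  acc.set i.toNat ((acc.getD i.toNat 0) + 1)

def solution (n : Int) (s : Int) : List Int :=
  let q := PySem.Int.floordiv s n
  let r := PySem.Int.mod s n
  if q = 0 then [-1]
  else
    -- [q]*n : Python yields [] for n ≤ 0, matching toNat's clamp
    let answer := List.replicate n.toNat q
    (PySem.List.pyRange (n - r) n 1).foldl pvBump answer

-- ===== PORT B =====
-- the while loop: while n > 0: q = s//n; out.append(q); s -= q; n -= 1
def pvGreedy (n : Int) (s : Int) (out : List Int) : List Int :=
  if n ≤ 0 then out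
  else
    let q := PySem.Int.floordiv s n
    pvGreedy (n - 1) (s - q) (out ++ [q])
termination_by n.toNat
decreasing_by simp only [not_le] at *; omega

def solution_alt (n : Int) (s : Int) : List Int :=
  if PySem.Int.floordiv s n = 0 then [-1]
  else pvGreedy n s []

-- ===== PRECONDITION & SPEC =====
-- Pre_ excludes only n = 0, where both Pythons raise ZeroDivisionError.
def Pre_solution (n : Int) (s : Int) : Prop := n ≠ 0
instance (n : Int) (s : Int) : Decidable (Pre_solution n s) := by unfold Pre_solution; infer_instance
def pvWitness_solution : Int × Int := (2, 9)

def Spec_solution (n : Int) (s : Int) (out : List Int) : Prop := out = solution_alt n s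
instance (n : Int) (s : Int) (out : List Int) : Decidable (Spec_solution n s out) := by unfold Spec_solution; infer_instance

-- ===== CLAIM (what is proved, stated in full; the proofs are below) =====
def Claim_equal_solution : Prop := ∀ (n : Int) (s : Int), Dom_solution n s → Pre_solution n s → Spec_solution n s (solution n s)

-- ===== LEMMAS AND PROOFS =====

-- A side: bumping index pre.length of (pre ++ q :: rest) turns that q into q+1
theorem pvBump_at_length (pre rest : List Int) (q : Int) :
    pvBump (pre ++ q :: rest) (pre.length : Int) = pre ++ (q + 1) :: rest := by
  simp [pvBump, List.getD]

-- A's loop invariant: sweeping indices [pre.length, pre.length + m) over pre ++ [q]*m yields pre ++ [q+1]*m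
theorem pvLoop (q : Int) (m : Nat) : ∀ (pre : List Int),
    (PySem.List.pyRange (pre.length : Int) ((pre.length : Int) + m) 1).foldl pvBump
      (pre ++ List.replicate m q) = pre ++ List.replicate m (q + 1) := by
  induction m with
  | zero => intro pre; simp [PySem.List.pyRange_one_eq_nil]
  | succ m ih =>
    intro pre
    rw [PySem.List.pyRange_one_cons (by push_cast; omega)]
    simp only [List.replicate_succ, List.foldl_cons, pvBump_at_length]
    have h := ih (pre ++ [q + 1])
    simp only [List.length_append, List.length_cons, List.length_nil, List.append_assoc,
      List.singleton_append] at h ⊢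
    convert h using 3 <;> push_cast <;> ring

-- the accumulator of the loop only collects output: pvGreedy n s out = out ++ pvGreedy n s []
theorem pvGreedy_acc : ∀ (k : Nat) (n s : Int), n.toNat = k → ∀ (out : List Int),
    pvGreedy n s out = out ++ pvGreedy n s [] := by
  intro k
  induction k with
  | zero =>
    intro n s hk out
    have hle : n ≤ 0 := by omega
    conv_lhs => rw [pvGreedy]
    conv_rhs => rw [pvGreedy]
    simp [hle]
  | succ k ih =>
    intro n s hk out
    have hpos : ¬ n ≤ 0 := by omega
    conv_lhs => rw [pvGreedy]
    conv_rhs => rw [pvGreedy]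
    simp only [hpos, if_false]
    rw [ih (n - 1) _ (by omega), ih (n - 1) _ (by omega) ([] ++ _)]
    simp

theorem pvGreedy_append (n s : Int) (out : List Int) :
    pvGreedy n s out = out ++ pvGreedy n s [] :=
  pvGreedy_acc n.toNat n s rfl out

-- B's invariant: distributing m*q + r (0 ≤ r ≤ m) over m slots gives m - r copies of q then r of q+1
theorem pvGreedy_char (m : Nat) : ∀ (q r : Int), 0 ≤ r → r ≤ (m : Int) →
    pvGreedy (m : Int) ((m : Int) * q + r) [] =
      List.replicate (m - r.toNat) q ++ List.replicate r.toNat (q + 1) := by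
  induction m with
  | zero =>
    intro q r h0 h1
    have : r = 0 := le_antisymm (by exact_mod_cast h1) h0
    subst this
    rw [pvGreedy]
    simp
  | succ m ih =>
    intro q r h0 h1
    rw [pvGreedy]
    have hpos : ¬ ((m : Int) + 1 ≤ 0) := by push_cast; omega
    push_cast
    simp only [hpos, if_false]
    push_cast at h1
    by_cases hr : r ≤ (m : Int)
    · -- quotient is q
      have hq : PySem.Int.floordiv ((m + 1 : Int) * q + r) ((m : Int) + 1) = q := by
        rw [PySem.Int.floordiv_eq_iff_of_pos (by positivity)]
        constructor <;> nlinarith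
      rw [show ((m : Int) + 1) * q + r = ((m + 1 : Int)) * q + r by push_cast; ring, hq]
      have hstep : ((m + 1 : Int)) * q + r - q = (m : Int) * q + r := by push_cast; ring
      rw [show (m : Int) + 1 - 1 = (m : Int) by ring, hstep,
        pvGreedy_append, ih q r h0 hr]
      have hle : r.toNat ≤ m := by omega
      rw [show m + 1 - r.toNat = (m - r.toNat) + 1 by omega, List.replicate_succ]
      simp
    · -- r = m + 1: quotient is q + 1
      have hrm : r = (m : Int) + 1 := by omega
      subst hrm
      have hq : PySem.Int.floordiv (((m : Int) + 1) * q + ((m : Int) + 1)) ((m : Int) + 1) = q + 1 := by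
        rw [PySem.Int.floordiv_eq_iff_of_pos (by positivity)]
        constructor <;> nlinarith
      rw [hq]
      have hstep : ((m : Int) + 1) * q + ((m : Int) + 1) - (q + 1) = (m : Int) * (q + 1) + 0 := by ring
      rw [show (m : Int) + 1 - 1 = (m : Int) by ring, hstep,
        pvGreedy_append, ih (q + 1) 0 le_rfl (by positivity)]
      have : ((m : Int) + 1).toNat = m + 1 := by omega
      simp [this, List.replicate_succ]

-- ===== VERDICT (by name: the statement is the Claim_ definition above) =====
theorem solution_spec : Claim_equal_solution := by
  intro n s _ hn
  unfold Spec_solution solution solution_alt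
  simp only []
  set q := PySem.Int.floordiv s n with hq
  set r := PySem.Int.mod s n with hr
  by_cases h0 : q = 0
  · simp [h0]
  · simp only [h0, if_false]
    rcases lt_trichotomy n 0 with hneg | hz | hpos
    · -- n < 0: both sides are []
      have hb := PySem.Int.mod_neg_bounds (a := s) hneg
      rw [← hr] at hb
      have h1 : n.toNat = 0 := by omega
      have hfold : ∀ (l : List Int), l.foldl pvBump ([] : List Int) = [] := by
        intro l; induction l with
        | nil => rfl
        | cons x xs ih => simpa [pvBump] using ih
      rw [pvGreedy]
      simp [h1, hfold, le_of_lt hneg]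
    · exact absurd hz hn
    · -- n > 0: 0 ≤ r < n, s = n*q + r
      have hrn : 0 ≤ r := by rw [hr]; exact PySem.Int.mod_nonneg s hpos
      have hrl : r < n := by rw [hr]; exact PySem.Int.mod_lt s hpos
      have hdm : q * n + r = s := by rw [hq, hr]; exact PySem.Int.floordiv_mul_add_mod s n
      -- A side
      have hlen : ((List.replicate (n - r).toNat q).length : Int) = n - r := by
        simp; omega
      have hsplit : List.replicate n.toNat q =
          List.replicate (n - r).toNat q ++ List.replicate r.toNat q := by
        rw [← List.replicate_add]; congr 1; omega
      have hA := pvLoop q r.toNat (List.replicate (n - r).toNat q)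
      rw [hlen] at hA
      rw [show (n - r + (r.toNat : Int)) = n by omega] at hA
      rw [hsplit, hA]
      -- B side
      have hm : ((n.toNat : Int)) = n := by omega
      have hB := pvGreedy_char n.toNat q r hrn (by omega)
      rw [hm] at hB
      rw [show n * q + r = s by linarith [hdm]] at hB
      rw [hB]
      congr 2
      omega
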